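-- pv_equiv track=rewrite | github.com/mdirgha18/Leetcode-problems | Maximum enemy forts that can be captured.py | captureForts
-- ===== SOURCE A (Python) =====
-- from typing import List
--
-- def captureForts(forts: List[int]) -> int:
--     if 1 not in forts or -1 not in forts:
--         return 0
--
--     out1 = [] #movement forward
--     flag = False
--     count1 = 0
--     #Forward transversal
--     for i in range(len(forts)):
--         if forts[i] == 1:
--             flag = True
--             count1 = 0
--         elif forts[i] == -1:
--             flag = False
--             out1.append(count1)
--             count1 = 0
--         elif flag and forts[i] == 0:
--             count1 += 1
--
--     fla = False
--     out2 = []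
--     count2 = 0
--
--     #Backward reversal
--     for i in range(len(forts)-1, -1, -1): #Movement forward
--         if forts[i] == 1:
--             fla = True
--             count2 = 0
--         elif forts[i] == -1:
--             fla = False
--             out2.append(count2)
--             count2 = 0
--         elif fla and forts[i] == 0:
--             count2 += 1
--
--     out1 += out2
--     return max(out1)
-- ===== SOURCE B (Python) =====
-- def captureForts(forts):
--     best = 0
--     last = 0   # last fort seen (1 or -1); 0 = none yet
--     zeros = 0  # zeros counted since the last fort
--     for v in forts:
--         if v == 1 or v == -1:
--             if last == -v:
--                 best = max(best, zeros)
--             last = v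
--             zeros = 0
--         elif v == 0:
--             zeros += 1
--     return best
-- ===== Notes on version B (the rewrite author's own statement) =====
-- stated objective: simpler
-- what changed: Replaced A's membership guard plus two directional scans (forward and backward) with accumulated capture lists and a final max() by a single left-to-right pass that keeps only (best, last fort seen, zeros since it) and records a capture whenever the current fort has the opposite sign.
import Mathlib
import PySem

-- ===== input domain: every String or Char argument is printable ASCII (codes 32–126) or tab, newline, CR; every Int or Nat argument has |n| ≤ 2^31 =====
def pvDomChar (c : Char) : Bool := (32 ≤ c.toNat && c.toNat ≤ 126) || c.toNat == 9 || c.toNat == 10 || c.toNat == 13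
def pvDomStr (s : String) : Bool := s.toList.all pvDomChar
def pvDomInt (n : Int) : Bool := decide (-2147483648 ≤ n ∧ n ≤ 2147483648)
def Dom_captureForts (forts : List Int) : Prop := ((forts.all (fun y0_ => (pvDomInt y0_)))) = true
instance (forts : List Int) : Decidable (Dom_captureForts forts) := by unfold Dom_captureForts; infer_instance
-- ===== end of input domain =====

-- B replaces A's guard + two directional scans + final max by ONE pass keeping (best, last fort, zeros since it) — objective: simpler.

-- ===== PORT A =====
-- one iteration of A's loop body (A's two loops run this identical body)
def stepA (s : List Int × Bool × Int) (v : Int) : List Int × Bool × Int :=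
  if v = 1 then (s.1, true, 0)
  else if v = -1 then (s.1 ++ [s.2.2], false, 0)
  else if s.2.1 ∧ v = 0 then (s.1, s.2.1, s.2.2 + 1)
  else s

-- A: guard, forward loop over indices 0..len-1 (= the list in order), backward loop over
-- indices len-1..0 (= the reversed list), then Python max of out1 + out2.  Under the guard
-- -1 ∈ forts, so out1 is nonempty and Python's max cannot raise; the .getD 0 is unreachable.
def captureForts (forts : List Int) : Int :=
  if (1 : Int) ∉ forts ∨ (-1 : Int) ∉ forts then 0
  else
    let s1 := forts.foldl stepA ([], false, 0)
    let s2 := forts.reverse.foldl stepA ([], false, 0)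
    ((s1.1 ++ s2.1).max?).getD 0

-- ===== PORT B =====
-- state: (best, last fort seen (0 = none yet), zeros since the last fort)
def stepB (s : Int × Int × Int) (v : Int) : Int × Int × Int :=
  if v = 1 ∨ v = -1 then
    (if s.2.1 = -v then max s.1 s.2.2 else s.1, v, 0)
  else if v = 0 then (s.1, s.2.1, s.2.2 + 1)
  else s

def captureForts_alt (forts : List Int) : Int :=
  (forts.foldl stepB (0, 0, 0)).1

-- ===== PRECONDITION & SPEC =====
def Spec_captureForts (forts : List Int) (out : Int) : Prop := out = captureForts_alt forts
instance (forts : List Int) (out : Int) : Decidable (Spec_captureForts forts out) := by unfold Spec_captureForts; infer_instance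

-- ===== CLAIM (what is proved, stated in full; the proofs are below) =====
def Claim_equal_captureForts : Prop := ∀ (forts : List Int), Dom_captureForts forts → Spec_captureForts forts (captureForts forts)

-- ===== LEMMAS AND PROOFS =====

def fwd : List Int → Bool → Int → List Int
  | [], _, _ => []
  | v :: t, flag, c =>
    if v = 1 then fwd t true 0
    else if v = -1 then c :: fwd t false 0
    else if flag ∧ v = 0 then fwd t flag (c + 1)
    else fwd t flag c

def caps : List Int → Int → Int → List Int
  | [], _, _ => []
  | v :: t, last, z =>
    if v = 1 ∨ v = -1 then (if last = -v then z :: caps t v 0 else caps t v 0)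
    else if v = 0 then caps t last (z + 1)
    else caps t last z

def capF : List Int → Int → Int → List Int
  | [], _, _ => []
  | v :: t, last, z =>
    if v = 1 ∨ v = -1 then (if last = 1 ∧ v = -1 then z :: capF t v 0 else capF t v 0)
    else if v = 0 then capF t last (z + 1)
    else capF t last z

def capB : List Int → Int → Int → List Int
  | [], _, _ => []
  | v :: t, last, z =>
    if v = 1 ∨ v = -1 then (if last = -1 ∧ v = 1 then z :: capB t v 0 else capB t v 0)
    else if v = 0 then capB t last (z + 1)
    else capB t last z

def stepSt (p : Int × Int) (v : Int) : Int × Int :=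
  if v = 1 ∨ v = -1 then (v, 0)
  else if v = 0 then (p.1, p.2 + 1)
  else p

def ecr : List Int → Int → Int → List Int
  | [], _, _ => []
  | v :: t, a, z =>
    if v = 1 ∨ v = -1 then (if a = 1 ∧ v = -1 then [z] else [])
    else if v = 0 then ecr t a (z + 1)
    else ecr t a z

def M (xs : List Int) : Int := xs.foldl max 0

theorem bridgeA : ∀ (l out : List Int) (flag : Bool) (c : Int),
    (l.foldl stepA (out, flag, c)).1 = out ++ fwd l flag c := by
  intro l
  induction l with
  | nil => intro out flag c; simp [fwd]
  | cons v t ih =>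
    intro out flag c
    simp only [List.foldl_cons, stepA, fwd]
    split_ifs with h1 h2 h3 <;> simp [ih]

theorem bridgeB : ∀ (l : List Int) (best last z : Int),
    (l.foldl stepB (best, last, z)).1 = (caps l last z).foldl max best := by
  intro l
  induction l with
  | nil => intro best last z; simp [caps]
  | cons v t ih =>
    intro best last z
    simp only [List.foldl_cons, stepB, caps]
    split_ifs with h1 h2 <;> simp [ih]

theorem foldl_max_max (xs : List Int) : ∀ (a b : Int), xs.foldl max (max a b) = max a (xs.foldl max b) := by
  induction xs with
  | nil => intro a b; simp
  | cons x t ih => intro a b; simpa [max_assoc] using ih a (max b x)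

theorem M_cons (x : Int) (xs : List Int) : M (x :: xs) = max x (M xs) := by
  simp only [M, List.foldl_cons]
  rw [show max 0 x = max x 0 from max_comm 0 x, foldl_max_max]

theorem M_nonneg (xs : List Int) : 0 ≤ M xs := (PySem.List.le_foldl_max xs 0).1

theorem M_append (xs ys : List Int) : M (xs ++ ys) = max (M xs) (M ys) := by
  simp only [M, List.foldl_append]
  conv_lhs => rw [show xs.foldl max 0 = max (xs.foldl max 0) 0 from (max_eq_left (M_nonneg xs)).symm]
  rw [foldl_max_max]

theorem foldr_max (xs : List Int) : ∀ b : Int, xs.foldr (fun x y => max y x) b = xs.foldl max b := by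
  induction xs with
  | nil => intro b; rfl
  | cons x t ih =>
    intro b
    simp only [List.foldr_cons, List.foldl_cons, ih]
    rw [show max b x = max x b from max_comm b x, foldl_max_max, max_comm]

theorem M_rev (xs : List Int) : M xs.reverse = M xs := by
  simp only [M, List.foldl_reverse]
  exact foldr_max xs 0

theorem capF_congr : ∀ (l : List Int) (a b z : Int), (a = 1 ↔ b = 1) → capF l a z = capF l b z := by
  intro l
  induction l with
  | nil => intros; rfl
  | cons v t ih =>
    intro a b z h
    simp only [capF]
    have hc : (a = 1 ∧ v = -1) ↔ (b = 1 ∧ v = -1) := and_congr h Iff.rfl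
    simp only [hc]
    split_ifs with h1 h2 h3 <;> first
      | rfl
      | exact ih _ _ _ h

theorem M_split : ∀ (l : List Int) (a z : Int),
    M (caps l a z) = max (M (capF l a z)) (M (capB l a z)) := by
  intro l
  induction l with
  | nil => intro a z; simp [caps, capF, capB, M]
  | cons v t ih =>
    intro a z
    simp only [caps, capF, capB]
    split_ifs with h1 h2 h3 h4 h5 h6 <;>
      simp_all [M_cons] <;> omega

theorem capF_z_congr : ∀ (l : List Int) (a z z' : Int), a ≠ 1 → capF l a z = capF l a z' := by
  intro l
  induction l with
  | nil => intros; rfl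
  | cons v t ih =>
    intro a z z' ha
    simp only [capF]
    have hno : ¬ (a = 1 ∧ v = -1) := fun h => ha h.1
    split_ifs <;> first | rfl | exact ih _ _ _ ha | exact (ha ‹a = 1 ∧ v = -1›.1).elim

theorem F1 : ∀ (l : List Int) (flag : Bool) (c : Int), (flag = false → c = 0) →
    M (fwd l flag c) = M (capF l (if flag then 1 else 0) c) := by
  intro l
  induction l with
  | nil => intros; rfl
  | cons v t ih =>
    intro flag c hc
    by_cases h1 : v = 1
    · subst h1
      simp only [fwd, capF]
      norm_num
      simpa using ih true 0 (by simp)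
    · by_cases h2 : v = -1
      · subst h2
        simp only [fwd, capF]
        norm_num
        cases flag with
        | true =>
          simp only [if_pos rfl, reduceIte]
          rw [M_cons, M_cons, capF_congr t (-1) 0 0 (by norm_num)]
          have := ih false 0 (fun _ => rfl)
          simp only [Bool.false_eq_true, if_neg (by simp : ¬ False)] at this
          simp only [this]
        | false =>
          have hc0 : c = 0 := hc rfl
          subst hc0
          simp only [Bool.false_eq_true, reduceIte]
          norm_num
          rw [M_cons, capF_congr t (-1) 0 0 (by norm_num)]
          have := ih false 0 (fun _ => rfl)
          simp only [Bool.false_eq_true, reduceIte] at this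
          rw [← this]
          have := M_nonneg (fwd t false 0)
          omega
      · by_cases h3 : v = 0
        · subst h3
          simp only [fwd, capF]
          norm_num
          cases flag with
          | true =>
            simp only [reduceIte]
            norm_num
            simpa using ih true (c + 1) (by simp)
          | false =>
            have hc0 : c = 0 := hc rfl
            subst hc0
            simp only [Bool.false_eq_true, reduceIte]
            norm_num
            rw [capF_z_congr t 0 1 0 (by norm_num)]
            simpa using ih false 0 (fun _ => rfl)
        · simp only [fwd, capF]
          have hf : ¬ (v = 1 ∨ v = -1) := by tauto
          have hg : ¬ ((flag : Bool) = true ∧ v = 0) := fun h => h3 h.2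
          simp only [if_neg h1, if_neg h2, if_neg hf, if_neg h3, if_neg hg]
          exact ih flag c hc

theorem ecr_ne_one : ∀ (l : List Int) (a z : Int), a ≠ 1 → ecr l a z = [] := by
  intro l
  induction l with
  | nil => intros; rfl
  | cons v t ih =>
    intro a z ha
    simp only [ecr]
    split_ifs <;> first | rfl | exact ih _ _ ha | exact (ha ‹a = 1 ∧ v = -1›.1).elim

theorem capB_append : ∀ (xs ys : List Int) (a z : Int),
    capB (xs ++ ys) a z
      = capB xs a z ++ capB ys (xs.foldl stepSt (a, z)).1 (xs.foldl stepSt (a, z)).2 := by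
  intro xs
  induction xs with
  | nil => intros; rfl
  | cons v t ih =>
    intro ys a z
    simp only [List.cons_append, capB, List.foldl_cons, stepSt]
    split_ifs <;> simp [ih]

theorem lemE : ∀ (u : List Int) (z : Int),
    ecr u.reverse 1 z
      = if (u.foldl stepSt (0, 0)).1 = -1 then [(u.foldl stepSt (0, 0)).2 + z] else [] := by
  intro u
  induction u using List.reverseRecOn with
  | nil => intro z; simp [ecr, stepSt]
  | append_singleton s w ih =>
    intro z
    rw [List.reverse_append, List.foldl_append]
    simp only [List.reverse_singleton, List.singleton_append, List.foldl_cons, List.foldl_nil, ecr]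
    by_cases h1 : w = 1
    · subst h1; simp [stepSt]
    · by_cases h2 : w = -1
      · subst h2; simp [stepSt]
      · by_cases h3 : w = 0
        · subst h3
          have hf : ¬ ((0:Int) = 1 ∨ (0:Int) = -1) := by norm_num
          simp only [if_neg hf, reduceIte, stepSt, if_neg hf, if_pos rfl, ih (z + 1)]
          split_ifs <;> simp <;> ring
        · have hf : ¬ (w = 1 ∨ w = -1) := by tauto
          simp only [if_neg hf, if_neg h3, stepSt, ih z]

theorem lemINV : ∀ (t : List Int) (a z : Int),
    capF t.reverse a z = ecr t.reverse a z ++ (capB t 0 0).reverse := by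
  intro t
  induction t using List.reverseRecOn with
  | nil => intros; rfl
  | append_singleton s v ih =>
    intro a z
    rw [List.reverse_append]
    simp only [List.reverse_singleton, List.singleton_append, capF, ecr]
    rw [capB_append s [v] 0 0]
    by_cases h1 : v = 1
    · subst h1
      norm_num
      rw [ih 1 0, lemE s 0]
      simp only [capB]
      norm_num
      split_ifs <;> simp
    · by_cases h2 : v = -1
      · subst h2
        norm_num
        rw [capF_congr s.reverse (-1) 0 0 (by norm_num), ih 0 0,
          ecr_ne_one s.reverse 0 0 (by norm_num)]
        simp only [capB]
        norm_num
        split_ifs <;> simp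
      · by_cases h3 : v = 0
        · subst h3
          have hf : ¬ ((0:Int) = 1 ∨ (0:Int) = -1) := by norm_num
          simp only [if_neg hf, reduceIte, ih a (z + 1), capB]
          norm_num
        · have hf : ¬ (v = 1 ∨ v = -1) := by tauto
          simp only [if_neg hf, if_neg h3, ih a z, capB]
          simp [hf, h3]

theorem caps_nil_one : ∀ (l : List Int) (a z : Int), (1:Int) ∉ l → a ≠ 1 → caps l a z = [] := by
  intro l
  induction l with
  | nil => intros; rfl
  | cons v t ih =>
    intro a z h1 ha
    have hv : v ≠ 1 := fun h => h1 (h ▸ List.mem_cons_self)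
    have ht : (1:Int) ∉ t := fun h => h1 (List.mem_cons_of_mem v h)
    simp only [caps]
    split_ifs with hf hc
    · rcases hf with h | h
      · exact (hv h).elim
      · subst h; norm_num at hc; exact (ha hc).elim
    · rcases hf with h | h
      · exact (hv h).elim
      · subst h; exact ih _ _ ht (by norm_num)
    · exact ih _ _ ht ha
    · exact ih _ _ ht ha

theorem caps_nil_neg : ∀ (l : List Int) (a z : Int), (-1:Int) ∉ l → a ≠ -1 → caps l a z = [] := by
  intro l
  induction l with
  | nil => intros; rfl
  | cons v t ih =>
    intro a z h1 ha
    have hv : v ≠ -1 := fun h => h1 (h ▸ List.mem_cons_self)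
    have ht : (-1:Int) ∉ t := fun h => h1 (List.mem_cons_of_mem v h)
    simp only [caps]
    split_ifs with hf hc
    · rcases hf with h | h
      · subst h; norm_num at hc; exact (ha hc).elim
      · exact (hv h).elim
    · rcases hf with h | h
      · subst h; exact ih _ _ ht (by norm_num)
      · exact (hv h).elim
    · exact ih _ _ ht ha
    · exact ih _ _ ht ha

theorem fwd_nonneg : ∀ (l : List Int) (flag : Bool) (c : Int), 0 ≤ c →
    ∀ x ∈ fwd l flag c, 0 ≤ x := by
  intro l
  induction l with
  | nil => intro _ _ _ x hx; simp [fwd] at hx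
  | cons v t ih =>
    intro flag c hc x hx
    simp only [fwd] at hx
    split_ifs at hx with h1 h2 h3
    · exact ih true 0 le_rfl x hx
    · rcases List.mem_cons.mp hx with h | h
      · exact h ▸ hc
      · exact ih false 0 le_rfl x h
    · exact ih flag (c + 1) (by omega) x hx
    · exact ih flag c hc x hx

theorem fwd_ne : ∀ (l : List Int) (flag : Bool) (c : Int), (-1:Int) ∈ l → fwd l flag c ≠ [] := by
  intro l
  induction l with
  | nil => intro _ _ h; simp at h
  | cons v t ih =>
    intro flag c hm
    simp only [fwd]
    have hmem : (-1:Int) = v ∨ (-1:Int) ∈ t := List.mem_cons.mp hm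
    split_ifs with h1 h2 h3
    · refine ih true 0 ?_
      rcases hmem with h | h
      · exact absurd (h.trans h1) (by norm_num)
      · exact h
    · simp
    · refine ih flag (c + 1) ?_
      rcases hmem with h | h
      · exact (h2 h.symm).elim
      · exact h
    · refine ih flag c ?_
      rcases hmem with h | h
      · exact (h2 h.symm).elim
      · exact h

theorem M_of_max? (xs : List Int) (hne : xs ≠ []) (hnn : ∀ x ∈ xs, 0 ≤ x) :
    xs.max?.getD 0 = M xs := by
  obtain ⟨x, t, rfl⟩ := List.exists_cons_of_ne_nil hne
  rw [List.max?_cons', Option.getD_some, M_cons]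
  have hx : 0 ≤ x := hnn x List.mem_cons_self
  rw [show max x (M t) = max x (t.foldl max 0) from rfl, ← foldl_max_max,
    show max x 0 = x from max_eq_left hx]

theorem final : ∀ (forts : List Int),
    (if (1 : Int) ∉ forts ∨ (-1 : Int) ∉ forts then (0:Int)
     else (((forts.foldl stepA ([], false, 0)).1 ++ (forts.reverse.foldl stepA ([], false, 0)).1).max?).getD 0)
    = (forts.foldl stepB (0, 0, 0)).1 := by
  intro l
  rw [bridgeB l 0 0 0]
  by_cases hg : (1 : Int) ∉ l ∨ (-1 : Int) ∉ l
  · rw [if_pos hg]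
    rcases hg with h | h
    · rw [caps_nil_one l 0 0 h (by norm_num)]; rfl
    · rw [caps_nil_neg l 0 0 h (by norm_num)]; rfl
  · rw [if_neg hg]
    push_neg at hg
    obtain ⟨h1, hm1⟩ := hg
    rw [bridgeA l [] false 0, bridgeA l.reverse [] false 0, List.nil_append, List.nil_append]
    have hne : fwd l false 0 ≠ [] := fwd_ne l false 0 hm1
    have hnn : ∀ x ∈ fwd l false 0 ++ fwd l.reverse false 0, 0 ≤ x := by
      intro x hx
      rcases List.mem_append.mp hx with h | h
      · exact fwd_nonneg l false 0 le_rfl x h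
      · exact fwd_nonneg l.reverse false 0 le_rfl x h
    rw [M_of_max? _ (fun h => hne (List.append_eq_nil_iff.mp h).1) hnn, M_append]
    have e1 : M (fwd l false 0) = M (capF l 0 0) := by
      simpa using F1 l false 0 (fun _ => rfl)
    have e2 : M (fwd l.reverse false 0) = M (capB l 0 0) := by
      have := F1 l.reverse false 0 (fun _ => rfl)
      simp only [Bool.false_eq_true, reduceIte] at this
      rw [this, lemINV l 0 0, ecr_ne_one l.reverse 0 0 (by norm_num), List.nil_append, M_rev]
    rw [e1, e2, ← M_split l 0 0]
    rfl

-- ===== VERDICT (by name: the statement is the Claim_ definition above) =====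
theorem captureForts_spec : Claim_equal_captureForts := by
  intro forts _
  show captureForts forts = captureForts_alt forts
  unfold captureForts captureForts_alt
  exact final forts
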